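-- pv_equiv track=rewrite | github.com/kharkilirov1/Anchor-engine | src/utils/anchor_geometry.py | build_tail_reference_layers
-- ===== SOURCE A (Python) =====
-- def build_tail_reference_layers(
--     probe_layers: list[int],
-- ) -> dict[str, int]:
--     if not probe_layers:
--         raise ValueError("probe_layers must not be empty")
--     layers = sorted(int(layer) for layer in probe_layers)
--     mature_index = max(0, len(layers) - 4)
--     template_prev_index = max(0, len(layers) - 2)
--     template_curr_index = len(layers) - 1
--     mature_layer = layers[mature_index]
--     return {
--         "slope_start_layer": layers[0],
--         "slope_end_layer": mature_layer,
--         "mature_layer": mature_layer,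
--         "template_prev_layer": layers[template_prev_index],
--         "template_curr_layer": layers[template_curr_index],
--     }
-- ===== SOURCE B (Python) =====
-- def _insert_sorted(top, v):
--     """Insert v into its place in the ascending list top (new list)."""
--     if not top or v <= top[0]:
--         return [v] + top
--     return [top[0]] + _insert_sorted(top[1:], v)
--
--
-- def build_tail_reference_layers(
--     probe_layers: list[int],
-- ) -> dict[str, int]:
--     if not probe_layers:
--         raise ValueError("probe_layers must not be empty")
--     running_min = None
--     top = []  # ascending list of at most the 4 largest values seen so far
--     for layer in probe_layers:
--         v = int(layer)
--         if running_min is None or v < running_min: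
--             running_min = v
--         if len(top) < 4:
--             top = _insert_sorted(top, v)
--         elif v > top[0]:
--             top = _insert_sorted(top[1:], v)
--     mature = top[0]
--     template_curr = top[-1]
--     template_prev = top[-2] if len(top) >= 2 else top[-1]
--     return {
--         "slope_start_layer": running_min,
--         "slope_end_layer": mature,
--         "mature_layer": mature,
--         "template_prev_layer": template_prev,
--         "template_curr_layer": template_curr,
--     }
-- ===== Notes on version B (the rewrite author's own statement) =====
-- stated objective: alternative
-- what changed: Replaces the full sort plus clamped index arithmetic with a single streaming pass that keeps a running minimum and an ascending buffer of the at-most-4 largest values, reading all five layers from that buffer.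
import Mathlib
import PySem

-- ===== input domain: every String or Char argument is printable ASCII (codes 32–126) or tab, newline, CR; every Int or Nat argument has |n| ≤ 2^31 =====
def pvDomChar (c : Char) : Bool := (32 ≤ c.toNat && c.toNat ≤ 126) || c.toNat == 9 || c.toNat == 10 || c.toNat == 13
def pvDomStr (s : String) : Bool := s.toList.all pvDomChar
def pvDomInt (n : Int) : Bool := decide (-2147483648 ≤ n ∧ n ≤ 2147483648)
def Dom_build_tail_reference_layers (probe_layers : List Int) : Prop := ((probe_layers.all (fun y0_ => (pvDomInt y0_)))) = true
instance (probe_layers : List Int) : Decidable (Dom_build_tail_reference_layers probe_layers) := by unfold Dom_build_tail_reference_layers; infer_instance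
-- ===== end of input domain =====

-- B replaces A's full sort with one streaming pass keeping a running minimum and an ascending buffer of the at-most-4 largest values.

-- ===== PORT A =====
-- Port of A. The explicit `raise ValueError` on empty input is excluded by
-- Pre_ (the port returns [] there). `int(layer)` on an int is the identity
-- (kept as the map); pyGetD is exact here since every index read is in range.
def build_tail_reference_layers (probe_layers : List Int) : List (String × Int) :=
  if probe_layers = [] then []
  else
    let layers := PySem.List.sorted (probe_layers.map fun layer => layer) (fun x => x) false
    let n : Int := layers.length
    let mature_index := max 0 (n - 4)
    let template_prev_index := max 0 (n - 2)
    let template_curr_index := n - 1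
    let mature_layer := PySem.List.pyGetD layers mature_index 0
    [("slope_start_layer", PySem.List.pyGetD layers 0 0),
     ("slope_end_layer", mature_layer),
     ("mature_layer", mature_layer),
     ("template_prev_layer", PySem.List.pyGetD layers template_prev_index 0),
     ("template_curr_layer", PySem.List.pyGetD layers template_curr_index 0)]

-- ===== PORT B =====
-- _insert_sorted from Source B, transcribed structurally.
def pvInsertSorted (v : Int) : List Int → List Int
  | [] => [v]
  | u :: t => if v ≤ u then v :: u :: t else u :: pvInsertSorted v t

-- one iteration of Source B's loop body over the state (running_min, top);
-- `top[1:]` is `tail` (PySem.List.slice_from_one), `top[0]` is in range (length 4).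
def pvStep (st : Option Int × List Int) (layer : Int) : Option Int × List Int :=
  let v := layer
  let m := match st.1 with
    | none => v
    | some m => if v < m then v else m
  let top := st.2
  if top.length < 4 then (some m, pvInsertSorted v top)
  else if PySem.List.pyGetD top 0 0 < v then (some m, pvInsertSorted v top.tail)
  else (some m, top)

-- Port of B; as in A's port, the raise on [] is excluded by Pre_, and the
-- pyGetD reads (top[0], top[-1], top[-2]) are in range under their guards.
def build_tail_reference_layers_alt (probe_layers : List Int) : List (String × Int) :=
  if probe_layers = [] then []
  else
    let st := probe_layers.foldl pvStep (none, [])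
    let top := st.2
    let running_min := st.1.getD 0      -- always `some` after the nonempty loop
    let mature := PySem.List.pyGetD top 0 0
    let template_curr := PySem.List.pyGetD top (-1) 0
    let template_prev :=
      if 2 ≤ top.length then PySem.List.pyGetD top (-2) 0
      else PySem.List.pyGetD top (-1) 0
    [("slope_start_layer", running_min),
     ("slope_end_layer", mature),
     ("mature_layer", mature),
     ("template_prev_layer", template_prev),
     ("template_curr_layer", template_curr)]

-- ===== PRECONDITION & SPEC =====
-- A raises ValueError exactly on the empty list; Pre_ excludes only that.
def Pre_build_tail_reference_layers (probe_layers : List Int) : Prop := probe_layers ≠ []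
instance (probe_layers : List Int) : Decidable (Pre_build_tail_reference_layers probe_layers) := by unfold Pre_build_tail_reference_layers; infer_instance
def pvWitness_build_tail_reference_layers : List Int := [5, 1, 4, 2, 3]

def Spec_build_tail_reference_layers (probe_layers : List Int) (out : List (String × Int)) : Prop := out = build_tail_reference_layers_alt probe_layers
instance (probe_layers : List Int) (out : List (String × Int)) : Decidable (Spec_build_tail_reference_layers probe_layers out) := by unfold Spec_build_tail_reference_layers; infer_instance

-- ===== CLAIM (what is proved, stated in full; the proofs are below) =====
def Claim_equal_build_tail_reference_layers : Prop := ∀ (probe_layers : List Int), Dom_build_tail_reference_layers probe_layers → Pre_build_tail_reference_layers probe_layers → Spec_build_tail_reference_layers probe_layers (build_tail_reference_layers probe_layers)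

-- ===== LEMMAS AND PROOFS =====

-- abbreviations for the proofs: the sorted list and "keep the last 4"
def pvS (l : List Int) : List Int := PySem.List.sorted l (fun x => x) false
def pvTrim (t : List Int) : List Int := t.drop (t.length - 4)

theorem pvInsertSorted_eq_orderedInsert (v : Int) (t : List Int) :
    pvInsertSorted v t = t.orderedInsert (· ≤ ·) v := by
  induction t with
  | nil => rfl
  | cons u t ih => simp [pvInsertSorted, List.orderedInsert_cons, ih]

theorem length_pvInsertSorted (v : Int) (t : List Int) :
    (pvInsertSorted v t).length = t.length + 1 := by
  rw [pvInsertSorted_eq_orderedInsert, List.orderedInsert_length]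

theorem pvS_append_singleton (l : List Int) (x : Int) :
    pvS (l ++ [x]) = pvInsertSorted x (pvS l) := by
  refine PySem.List.sorted_id_eq_of_perm_of_pairwise _ _ ?_ ?_
  · have p1 : (pvInsertSorted x (pvS l)).Perm (x :: pvS l) := by
      rw [pvInsertSorted_eq_orderedInsert]; exact List.perm_orderedInsert _ x _
    have p2 : (x :: pvS l).Perm (x :: l) :=
      (PySem.List.sorted_perm l (fun y => y) false).cons x
    exact p1.trans (p2.trans (List.perm_append_singleton x l).symm)
  · rw [pvInsertSorted_eq_orderedInsert]
    exact List.Pairwise.orderedInsert x _ (PySem.List.sorted_pairwise l (fun y => y))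

theorem pvTrim_cons (a : Int) (t : List Int) (h : 4 ≤ t.length) :
    pvTrim (a :: t) = pvTrim t := by
  unfold pvTrim
  have : (a :: t).length - 4 = (t.length - 4) + 1 := by simp only [List.length_cons]; omega
  rw [this, List.drop_succ_cons]

theorem pvTrim_of_short (t : List Int) (h : t.length ≤ 4) : pvTrim t = t := by
  unfold pvTrim
  have : t.length - 4 = 0 := by omega
  simp [this]

theorem length_pvTrim (t : List Int) : (pvTrim t).length = t.length - (t.length - 4) := by
  simp [pvTrim]

-- core trimming lemma: inserting into the kept tail, then trimming,
-- equals trimming the insertion into the full sorted list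
theorem pvTrim_insert (x : Int) (s : List Int) (hs : s.Pairwise (· ≤ ·)) :
    pvTrim (pvInsertSorted x (pvTrim s)) = pvTrim (pvInsertSorted x s) := by
  induction s with
  | nil => rfl
  | cons a s' ih =>
    rcases List.pairwise_cons.mp hs with ⟨ha, hs'⟩
    by_cases hlen : s'.length < 4
    · rw [pvTrim_of_short (a :: s') (by simp only [List.length_cons]; omega)]
    · rw [not_lt] at hlen
      rw [pvTrim_cons a s' hlen]
      by_cases hxa : x ≤ a
      · have hins : pvInsertSorted x (a :: s') = x :: a :: s' := by
          simp [pvInsertSorted, hxa]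
        rw [hins, pvTrim_cons x (a :: s') (by simp only [List.length_cons]; omega), pvTrim_cons a s' hlen]
        -- the kept tail of s' has length exactly 4; its head is ≥ a ≥ x
        have hlt : (pvTrim s').length = 4 := by rw [length_pvTrim]; omega
        obtain ⟨u, t, hut⟩ : ∃ u t, pvTrim s' = u :: t := by
          cases h : pvTrim s' with
          | nil => rw [h] at hlt; simp at hlt
          | cons u t => exact ⟨u, t, rfl⟩
        have hu : x ≤ u := by
          have hmem : u ∈ s' := by
            have : u ∈ pvTrim s' := by rw [hut]; exact List.mem_cons_self
            exact List.mem_of_mem_drop this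
          exact le_trans hxa (ha u hmem)
        rw [hut]
        have : pvInsertSorted x (u :: t) = x :: u :: t := by simp [pvInsertSorted, hu]
        rw [this, pvTrim_cons x (u :: t) (by have h4 := hlt; rw [hut] at h4; simp only [List.length_cons] at h4 ⊢; omega)]
        rw [← hut, pvTrim_of_short _ (by omega)]
      · have hins : pvInsertSorted x (a :: s') = a :: pvInsertSorted x s' := by
          simp [pvInsertSorted, hxa]
        rw [hins, pvTrim_cons a _ (by rw [length_pvInsertSorted]; omega)]
        exact ih hs'

-- trimming as Source B writes it (drop the head when the buffer exceeds 4)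
theorem pvTrim5 (t : List Int) (h : t.length ≤ 5) :
    (if 4 < t.length then t.tail else t) = pvTrim t := by
  by_cases h4 : 4 < t.length
  · have : t.length - 4 = 1 := by omega
    simp [h4, pvTrim, this, List.drop_one]
  · simp [h4, pvTrim_of_short t (by omega)]

-- Source B's guarded step, on a buffer of at most 4, equals
-- "insert, then drop the head when the buffer exceeds 4"
theorem pvStep_guard (m? : Option Int) (t : List Int) (v : Int) (h : t.length ≤ 4) :
    pvStep (m?, t) v =
      ((match m? with
        | none => some v
        | some m => some (if v < m then v else m)),
       if 4 < (pvInsertSorted v t).length then (pvInsertSorted v t).tail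
       else pvInsertSorted v t) := by
  by_cases hlt : t.length < 4
  · have hno : ¬ 4 < (pvInsertSorted v t).length := by rw [length_pvInsertSorted]; omega
    simp only [pvStep]
    rw [if_pos hlt, if_neg hno]
    cases m? <;> rfl
  · have h4 : t.length = 4 := by omega
    obtain ⟨a, rest, rfl⟩ : ∃ a rest, t = a :: rest := by
      cases hh : t with
      | nil => rw [hh] at h4; simp at h4
      | cons a rest => exact ⟨a, rest, rfl⟩
    have h3 : rest.length = 3 := by simp only [List.length_cons] at h4; omega
    by_cases hav : a < v
    · have hins : pvInsertSorted v (a :: rest) = a :: pvInsertSorted v rest := by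
        simp only [pvInsertSorted]
        rw [if_neg (by omega)]
      simp only [pvStep, PySem.List.pyGetD_zero_cons]
      rw [if_neg hlt, if_pos hav, hins,
        if_pos (by simp only [List.length_cons, length_pvInsertSorted]; omega),
        List.tail_cons]
      cases m? <;> rfl
    · have hins : pvInsertSorted v (a :: rest) = v :: a :: rest := by
        simp only [pvInsertSorted]
        rw [if_pos (by omega)]
      simp only [pvStep, PySem.List.pyGetD_zero_cons]
      rw [if_neg hlt, if_neg hav, hins,
        if_pos (by simp only [List.length_cons]; omega),
        List.tail_cons]
      cases m? <;> rfl

-- the loop invariant: after a nonempty prefix, the state is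
-- (min of the prefix = head of its sorted form, last 4 of its sorted form)
theorem pv_fold_invariant (l : List Int) (h : l ≠ []) :
    l.foldl pvStep (none, []) = (some ((pvS l).headD 0), pvTrim (pvS l)) := by
  induction l using List.reverseRecOn with
  | nil => exact absurd rfl h
  | append_singleton l x ih =>
    by_cases hl : l = []
    · subst hl
      have hx : pvS [x] = [x] :=
        PySem.List.sorted_id_eq_of_perm_of_pairwise _ _ (List.Perm.refl _) (by simp)
      simp [pvStep, hx, pvTrim, pvInsertSorted]
    · rw [List.foldl_append, ih hl]
      have hsx := pvS_append_singleton l x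
      have hne : pvS l ≠ [] := by
        intro hc; exact hl ((PySem.List.sorted_eq_nil_iff _ _ _).mp hc)
      obtain ⟨u, t, hut⟩ : ∃ u t, pvS l = u :: t := by
        cases hh : pvS l with
        | nil => exact absurd hh hne
        | cons u t => exact ⟨u, t, rfl⟩
      simp only [List.foldl_cons, List.foldl_nil]
      rw [pvStep_guard _ _ _ (by rw [length_pvTrim]; omega), hsx]
      rw [Prod.mk.injEq, Option.some.injEq]
      constructor
      · -- running minimum = head of the sorted list
        rw [hut]
        simp only [List.headD_cons]
        by_cases hxu : x ≤ u
        · have : pvInsertSorted x (u :: t) = x :: u :: t := by simp [pvInsertSorted, hxu]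
          rw [this]
          simp only [List.headD_cons]
          split_ifs with h1 <;> omega
        · have : pvInsertSorted x (u :: t) = u :: pvInsertSorted x t := by
            simp [pvInsertSorted, hxu]
          rw [this]
          simp only [List.headD_cons]
          split_ifs with h1 <;> omega
      · -- kept buffer = last 4 of the sorted list
        rw [pvTrim5 _ (by rw [length_pvInsertSorted, length_pvTrim]; omega)]
        exact pvTrim_insert x (pvS l) (PySem.List.sorted_pairwise l (fun y => y))

-- getD through drop
theorem getD_pvTrim (s : List Int) (j : Nat) :
    (pvTrim s).getD j 0 = s.getD ((s.length - 4) + j) 0 := by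
  simp [pvTrim, List.getD_eq_getElem?_getD, List.getElem?_drop]

theorem map_id_eq (l : List Int) : (l.map fun layer => layer) = l := by
  simp

-- ===== VERDICT (by name: the statement is the Claim_ definition above) =====
theorem build_tail_reference_layers_spec : Claim_equal_build_tail_reference_layers := by
  intro l _ hpre
  unfold Spec_build_tail_reference_layers
  unfold build_tail_reference_layers build_tail_reference_layers_alt
  have hl : l ≠ [] := hpre
  rw [if_neg hl, if_neg hl]
  rw [pv_fold_invariant l hl]
  rw [map_id_eq]
  set s := pvS l with hs
  have hslen : s.length = l.length := by
    rw [hs]; exact ((PySem.List.sorted_perm l (fun y => y) false).length_eq)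
  have hne : s ≠ [] := by
    rw [hs]; intro hc; exact hl ((PySem.List.sorted_eq_nil_iff _ _ _).mp hc)
  have hn : 1 ≤ s.length := by
    rw [hslen]
    cases l with
    | nil => exact absurd rfl hl
    | cons _ _ => simp
  set n : Nat := s.length with hnn
  have htl : (pvTrim s).length = n - (n - 4) := length_pvTrim s
  simp only [Option.getD_some]
  have hA : PySem.List.sorted l (fun x => x) false = s := hs.symm
  rw [hA, ← hnn]
  -- reading the kept buffer at a negative index = reading the sorted list near its end
  have hNeg : ∀ k : Nat, 0 < k → k ≤ (pvTrim s).length →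
      PySem.List.pyGetD (pvTrim s) (-(k : Int)) 0 = s.getD (n - k) 0 := by
    intro k hk hkle
    rw [PySem.List.pyGetD_neg_natCast (pvTrim s) k 0 hk hkle]
    rw [← List.getD_eq_getElem (pvTrim s) 0 (n := (pvTrim s).length - k) (by omega)]
    rw [getD_pvTrim, ← hnn]
    congr 1
    omega
  have e0 : PySem.List.pyGetD s 0 0 = s.headD 0 := by
    obtain ⟨u, t, hut⟩ : ∃ u t, s = u :: t := by
      cases hh : s with
      | nil => exact absurd hh hne
      | cons u t => exact ⟨u, t, rfl⟩
    rw [hut, PySem.List.pyGetD_zero]; rfl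
  have e_mat : PySem.List.pyGetD s (max 0 ((n : Int) - 4)) 0 = PySem.List.pyGetD (pvTrim s) 0 0 := by
    rw [PySem.List.pyGetD_zero, getD_pvTrim, ← hnn]
    have hc : max 0 ((n : Int) - 4) = ((n - 4 : Nat) : Int) := by omega
    rw [hc, PySem.List.pyGetD_natCast]
    congr 1
  have e_curr : PySem.List.pyGetD s ((n : Int) - 1) 0 = PySem.List.pyGetD (pvTrim s) (-1) 0 := by
    rw [show (-1 : Int) = -((1 : Nat) : Int) by norm_num]
    rw [hNeg 1 (by omega) (by omega)]
    have hc : (n : Int) - 1 = ((n - 1 : Nat) : Int) := by omega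
    rw [hc, PySem.List.pyGetD_natCast]
  have e_prev : PySem.List.pyGetD s (max 0 ((n : Int) - 2)) 0 =
      (if 2 ≤ (pvTrim s).length then PySem.List.pyGetD (pvTrim s) (-2) 0
       else PySem.List.pyGetD (pvTrim s) (-1) 0) := by
    by_cases h2 : 2 ≤ (pvTrim s).length
    · rw [if_pos h2]
      rw [show (-2 : Int) = -((2 : Nat) : Int) by norm_num]
      rw [hNeg 2 (by omega) h2]
      have hc : max 0 ((n : Int) - 2) = ((n - 2 : Nat) : Int) := by omega
      rw [hc, PySem.List.pyGetD_natCast]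
    · rw [if_neg h2]
      rw [show (-1 : Int) = -((1 : Nat) : Int) by norm_num]
      rw [hNeg 1 (by omega) (by omega)]
      have hc : max 0 ((n : Int) - 2) = ((n - 1 : Nat) : Int) := by omega
      rw [hc, PySem.List.pyGetD_natCast]
  rw [e0, e_mat, e_curr, e_prev]
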